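-- pv_equiv track=rewrite | github.com/glowingkitty/OpenMates | backend/scripts/aggregate_leaderboards.py | match_lmarena_model
-- ===== SOURCE A (Python) =====
-- from typing import Any, Dict, List, Optional, Tuple
--
-- def match_lmarena_model(
--     lmarena_entry: Dict,
--     external_index: Dict[str, Dict[str, str]]
-- ) -> Optional[str]:
--     """
--     Try to match an LMArena entry to our model ID.
--
--     Args:
--         lmarena_entry: LMArena ranking entry
--         external_index: Index of external IDs to our model IDs
--
--     Returns:
--         Our model_id if matched, None otherwise
--     """
--     model_name = lmarena_entry.get("model", "").lower()
--
--     # Direct lookup in lmarena index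
--     if model_name in external_index["lmarena"]:
--         return external_index["lmarena"][model_name]
--
--     # Try partial matching for common patterns
--     for lmarena_id, our_id in external_index["lmarena"].items():
--         # Handle variations like "claude-4.5-sonnet" vs "claude-sonnet-4-5"
--         if lmarena_id in model_name or model_name in lmarena_id:
--             return our_id
--
--     return None
-- ===== SOURCE B (Python) =====
-- def match_lmarena_model(lmarena_entry, external_index):
--     """Staged filter-then-select: collect every substring-overlapping candidate
--     in one comprehension (an exact match is automatically among them, since a
--     string is a substring of itself), then prefer the exact-keyed candidate,
--     else take the first candidate, else None."""
--     model_name = lmarena_entry.get("model", "").lower()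
--     hits = [(k, v) for k, v in external_index["lmarena"].items()
--             if k in model_name or model_name in k]
--     exact = [v for k, v in hits if k == model_name]
--     if exact:
--         return exact[0]
--     return hits[0][1] if hits else None
-- ===== Notes on version B (the rewrite author's own statement) =====
-- stated objective: alternative
-- what changed: B replaces A's dict-membership lookup plus early-returning fallback scan with two staged comprehensions: it first collects all substring-overlapping candidates (exact matches are necessarily among them, since a string contains itself), then returns the exact-keyed candidate if present, else the first candidate.
import Mathlib
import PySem

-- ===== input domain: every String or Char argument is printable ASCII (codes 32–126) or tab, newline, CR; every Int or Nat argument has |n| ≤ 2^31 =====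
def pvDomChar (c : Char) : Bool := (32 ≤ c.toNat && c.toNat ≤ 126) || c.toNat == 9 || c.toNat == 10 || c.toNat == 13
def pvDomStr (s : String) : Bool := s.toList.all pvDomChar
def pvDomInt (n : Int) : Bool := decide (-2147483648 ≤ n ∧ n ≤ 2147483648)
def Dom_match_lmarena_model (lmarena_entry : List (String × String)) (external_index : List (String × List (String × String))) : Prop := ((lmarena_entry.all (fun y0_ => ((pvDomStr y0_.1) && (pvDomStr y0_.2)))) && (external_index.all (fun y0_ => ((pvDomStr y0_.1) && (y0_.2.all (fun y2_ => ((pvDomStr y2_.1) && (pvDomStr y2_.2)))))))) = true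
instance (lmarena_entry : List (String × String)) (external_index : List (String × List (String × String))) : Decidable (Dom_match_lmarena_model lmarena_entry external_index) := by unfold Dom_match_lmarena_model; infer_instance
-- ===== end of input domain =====

-- B replaces A's membership-lookup-then-early-exit-scan with two staged filters
-- (all substring-overlap candidates, then exact-vs-first selection); alternative, same cost.

-- ===== PORT A =====
-- A's fallback loop: return the value of the first pair whose key is a substring
-- of model_name or vice versa
def pvPartialScan (model_name : String) : List (String × String) → Option String
  | [] => none
  | (lmarena_id, our_id) :: rest =>
    if PySem.Str.isIn lmarena_id model_name || PySem.Str.isIn model_name lmarena_id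
    then some our_id else pvPartialScan model_name rest

def match_lmarena_model (lmarena_entry : List (String × String)) (external_index : List (String × List (String × String))) : Option String :=
  let model_name := PySem.Str.lower ((PySem.Dict.mk lmarena_entry).getD "model" "")
  match (PySem.Dict.mk external_index).get? "lmarena" with
  | none => none   -- Python raises KeyError here; excluded by Pre_
  | some lm =>
    let d := PySem.Dict.mk lm
    if d.contains model_name then d.get? model_name
    else pvPartialScan model_name d.items

-- ===== PORT B =====
def match_lmarena_model_alt (lmarena_entry : List (String × String)) (external_index : List (String × List (String × String))) : Option String :=
  let model_name := PySem.Str.lower ((PySem.Dict.mk lmarena_entry).getD "model" "")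
  match (PySem.Dict.mk external_index).get? "lmarena" with
  | none => none   -- Python raises KeyError here; excluded by Pre_
  | some lm =>
    let hits := (PySem.Dict.mk lm).items.filter
      (fun p => PySem.Str.isIn p.1 model_name || PySem.Str.isIn model_name p.1)
    let exact := (hits.filter (fun p => p.1 == model_name)).map (·.2)
    match exact with
    | v :: _ => some v
    | [] => hits.head?.map (·.2)

-- ===== PRECONDITION & SPEC =====
-- Pre_ excludes exactly the inputs where external_index has no "lmarena" key, on which A raises KeyError.
def Pre_match_lmarena_model (_lmarena_entry : List (String × String)) (external_index : List (String × List (String × String))) : Prop :=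
  (PySem.Dict.mk external_index).contains "lmarena" = true
instance (lmarena_entry : List (String × String)) (external_index : List (String × List (String × String))) : Decidable (Pre_match_lmarena_model lmarena_entry external_index) := by unfold Pre_match_lmarena_model; infer_instance

def pvWitness_match_lmarena_model : (List (String × String)) × (List (String × List (String × String))) :=
  ([("model", "gpt-4")], [("lmarena", [("gpt-4", "openai/gpt-4")])])

def Spec_match_lmarena_model (lmarena_entry : List (String × String)) (external_index : List (String × List (String × String))) (out : Option String) : Prop := out = match_lmarena_model_alt lmarena_entry external_index
instance (lmarena_entry : List (String × String)) (external_index : List (String × List (String × String))) (out : Option String) : Decidable (Spec_match_lmarena_model lmarena_entry external_index out) := by unfold Spec_match_lmarena_model; infer_instance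

-- ===== CLAIM =====
def Claim_equal_match_lmarena_model : Prop := ∀ (lmarena_entry : List (String × String)) (external_index : List (String × List (String × String))), Dom_match_lmarena_model lmarena_entry external_index → Pre_match_lmarena_model lmarena_entry external_index → Spec_match_lmarena_model lmarena_entry external_index (match_lmarena_model lmarena_entry external_index)

-- ===== LEMMAS AND PROOFS =====

lemma pvIsIn_self (s : String) : PySem.Str.isIn s s = true :=
  (PySem.Str.isIn_iff_infix s s).mpr (List.infix_refl _)

-- the first exact-keyed pair of the list is exactly A's dict lookup
lemma pvFilter_exact_eq_get? (m : String) (l : List (String × String)) :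
    ((l.filter (fun p => p.1 == m)).head?.map (·.2)) = (PySem.Dict.mk l).get? m := by
  induction l with
  | nil => rfl
  | cons p rest ih =>
    obtain ⟨k, v⟩ := p
    by_cases hk : (k == m) = true
    · simp [hk, PySem.Dict.get?_mk_cons]
    · simp only [List.filter_cons, hk, Bool.false_eq_true, if_neg, not_false_eq_true,
        PySem.Dict.get?_mk_cons, ih]

-- A's fallback loop is the head of B's candidate list
lemma pvPartialScan_eq_filter_head (m : String) (l : List (String × String)) :
    pvPartialScan m l =
      (l.filter (fun p => PySem.Str.isIn p.1 m || PySem.Str.isIn m p.1)).head?.map (·.2) := by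
  induction l with
  | nil => rfl
  | cons p rest ih =>
    obtain ⟨k, v⟩ := p
    by_cases hc : (PySem.Str.isIn k m || PySem.Str.isIn m k) = true
    · simp only [pvPartialScan, if_pos hc, List.filter_cons]
      simp
    · simp only [pvPartialScan, if_neg hc, List.filter_cons, ih]

-- filtering exact keys out of the candidate list = filtering them out of the whole list
lemma pvFilter_filter_exact (m : String) (l : List (String × String)) :
    ((l.filter (fun p => PySem.Str.isIn p.1 m || PySem.Str.isIn m p.1)).filter
        (fun p => p.1 == m)) = l.filter (fun p => p.1 == m) := by
  rw [List.filter_filter]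
  apply List.filter_congr
  intro p _
  by_cases hk : (p.1 == m) = true
  · have hp : p.1 = m := by simpa using hk
    have hi : PySem.Chars.isIn m.toList m.toList = true := by
      simpa [PySem.Str.isIn] using pvIsIn_self m
    simp [hp, hi]
  · simp [hk]

-- ===== VERDICT =====
theorem match_lmarena_model_spec : Claim_equal_match_lmarena_model := by
  intro e ei _ hpre
  unfold Spec_match_lmarena_model match_lmarena_model match_lmarena_model_alt
  cases hlm : (PySem.Dict.mk ei).get? "lmarena" with
  | none =>
    exfalso
    rw [Pre_match_lmarena_model, PySem.Dict.contains_eq_isSome_get?, hlm] at hpre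
    simp at hpre
  | some lm =>
    simp only
    set m := PySem.Str.lower ((PySem.Dict.mk e).getD "model" "") with hm
    rw [pvFilter_filter_exact]
    cases hg : (PySem.Dict.mk lm).get? m with
    | some v =>
      have hc : (PySem.Dict.mk lm).contains m = true := by
        rw [PySem.Dict.contains_eq_isSome_get?, hg]; rfl
      have hx := pvFilter_exact_eq_get? m lm
      rw [hg] at hx
      cases hfe : (lm.filter (fun p => p.1 == m)) with
      | nil => rw [hfe] at hx; simp at hx
      | cons q qs =>
        rw [hfe] at hx
        simp only [List.head?_cons, Option.map_some] at hx
        simp [hc, hx]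
    | none =>
      have hc : (PySem.Dict.mk lm).contains m = false := by
        rw [PySem.Dict.contains_eq_isSome_get?, hg]; rfl
      have hx := pvFilter_exact_eq_get? m lm
      rw [hg] at hx
      have hfe : (lm.filter (fun p => p.1 == m)) = [] := by
        cases hfe : (lm.filter (fun p => p.1 == m)) with
        | nil => rfl
        | cons q qs => rw [hfe] at hx; simp at hx
      simp [hc, hfe, pvPartialScan_eq_filter_head m lm]
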